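-- pv_equiv track=rewrite | github.com/pedrohft/Interviews | TesteLogicaProgramacao_Python.py | distancia_vogal
-- ===== SOURCE A (Python) =====
-- def distancia_vogal(palavra):
-- 	s = ''
-- 	for i in palavra:
-- 		da = abs(ord(i.upper()) - ord('A'))
-- 		de = abs(ord(i.upper()) - ord('E'))
-- 		di = abs(ord(i.upper()) - ord('I'))
-- 		do = abs(ord(i.upper()) - ord('O'))
-- 		du = abs(ord(i.upper()) - ord('U'))
--
-- 		s = s + str(min(da, de, di, do, du))
--
-- 	return s
-- ===== SOURCE B (Python) =====
-- _V = (65, 69, 73, 79, 85)  # sorted vowel ordinals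
--
--
-- def _bisect_left(v, c):
--     lo, hi = 0, len(v)
--     while lo < hi:
--         mid = (lo + hi) // 2
--         if v[mid] < c:
--             lo = mid + 1
--         else:
--             hi = mid
--     return lo
--
--
-- def distancia_vogal(palavra):
--     out = []
--     for i in palavra:
--         c = ord(i.upper())
--         idx = _bisect_left(_V, c)
--         if idx == 0:
--             d = _V[0] - c
--         elif idx == len(_V):
--             d = c - _V[-1]
--         else:
--             d = min(c - _V[idx - 1], _V[idx] - c)
--         out.append(str(d))
--     return ''.join(out)
-- ===== Notes on version B (the rewrite author's own statement) =====
-- stated objective: alternative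
-- what changed: Per character, instead of computing all five absolute distances and taking their minimum, B locates ord(i.upper()) in the sorted vowel list with a hand-written bisect_left and compares only the two neighbouring vowels; it also collects the pieces in a list and joins once instead of repeated string concatenation.
import Mathlib
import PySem

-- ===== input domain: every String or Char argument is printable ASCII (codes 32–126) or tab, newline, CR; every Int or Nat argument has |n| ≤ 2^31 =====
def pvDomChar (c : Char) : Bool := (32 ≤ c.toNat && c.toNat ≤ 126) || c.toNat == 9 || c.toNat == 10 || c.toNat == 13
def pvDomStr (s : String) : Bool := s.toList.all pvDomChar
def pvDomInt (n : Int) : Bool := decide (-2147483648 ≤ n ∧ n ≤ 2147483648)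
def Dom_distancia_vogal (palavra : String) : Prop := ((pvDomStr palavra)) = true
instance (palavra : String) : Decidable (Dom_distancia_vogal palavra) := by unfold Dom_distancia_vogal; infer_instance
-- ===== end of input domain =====

-- B replaces A's five-way abs/min scan per character by a bisect_left binary search in the
-- sorted vowel list, comparing only the two neighbouring vowels (objective: alternative).

set_option maxHeartbeats 1000000


-- ===== PORT A =====
-- for-loop over the characters; five abs distances; min of five appended to the accumulator
def distancia_vogal (palavra : String) : String :=
  palavra.toList.foldl (fun s i =>
    let o : Int := (PySem.Chars.upperChar i).toNat  -- ord(i.upper()); exact per char on the ASCII domain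
    let da := |o - 65|
    let de := |o - 69|
    let di := |o - 73|
    let dov := |o - 79|
    let du := |o - 85|
    s ++ PySem.Int.toStr (min da (min de (min di (min dov du))))) ""

-- ===== PORT B =====
def bVowels : List Int := [65, 69, 73, 79, 85]

-- Source B's hand-written bisect_left while-loop, step for step; the extra fuel argument (hi - lo
-- at entry suffices, since hi - lo strictly shrinks) only makes the loop structurally total.
def bBisectAux (v : List Int) (c : Int) : Nat → Nat → Nat → Nat
  | 0, lo, _ => lo
  | fuel + 1, lo, hi =>
    if lo < hi then
      let mid := (lo + hi) / 2
      if v.getD mid 0 < c then bBisectAux v c fuel (mid + 1) hi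
      else bBisectAux v c fuel lo mid
    else lo

def distancia_vogal_alt (palavra : String) : String :=
  String.join (palavra.toList.map (fun i =>
    let c : Int := (PySem.Chars.upperChar i).toNat
    let idx := bBisectAux bVowels c 5 0 5
    let d : Int :=
      if idx = 0 then bVowels.getD 0 0 - c
      else if idx = 5 then c - bVowels.getD 4 0
      else min (c - bVowels.getD (idx - 1) 0) (bVowels.getD idx 0 - c)
    PySem.Int.toStr d))

-- ===== PRECONDITION & SPEC =====
def Spec_distancia_vogal (palavra : String) (out : String) : Prop := out = distancia_vogal_alt palavra
instance (palavra : String) (out : String) : Decidable (Spec_distancia_vogal palavra out) := by unfold Spec_distancia_vogal; infer_instance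

-- ===== CLAIM (what is proved, stated in full; the proofs are below) =====
def Claim_equal_distancia_vogal : Prop := ∀ (palavra : String), Dom_distancia_vogal palavra → Spec_distancia_vogal palavra (distancia_vogal palavra)

-- ===== LEMMAS AND PROOFS =====

-- the per-character piece both ports append, in A's five-way-min form
def pvCharStr (i : Char) : String :=
  let o : Int := (PySem.Chars.upperChar i).toNat
  PySem.Int.toStr (min |o - 65| (min |o - 69| (min |o - 73| (min |o - 79| |o - 85|))))

-- the bisect-based neighbour distance equals the five-way minimum, for every integer ordinal
theorem pvChar_eq (c : Int) :
    (if bBisectAux bVowels c 5 0 5 = 0 then bVowels.getD 0 0 - c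
     else if bBisectAux bVowels c 5 0 5 = 5 then c - bVowels.getD 4 0
     else min (c - bVowels.getD (bBisectAux bVowels c 5 0 5 - 1) 0)
              (bVowels.getD (bBisectAux bVowels c 5 0 5) 0 - c))
    = min |c - 65| (min |c - 69| (min |c - 73| (min |c - 79| |c - 85|))) := by
  rcases lt_or_ge 85 c with h | hb85
  · have hidx : bBisectAux bVowels c 5 0 5 = 5 := by
      norm_num [bBisectAux, bVowels, List.getD, h, show (73:Int) < c by omega]
    rw [hidx]
    norm_num [bVowels, List.getD]
    rw [abs_of_nonneg (by omega : (0:Int) ≤ c - 65), abs_of_nonneg (by omega : (0:Int) ≤ c - 69),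
        abs_of_nonneg (by omega : (0:Int) ≤ c - 73), abs_of_nonneg (by omega : (0:Int) ≤ c - 79),
        abs_of_nonneg (by omega : (0:Int) ≤ c - 85)]
    simp only [min_def]; split_ifs <;> omega
  rcases lt_or_ge 79 c with h | hb79
  · have hidx : bBisectAux bVowels c 5 0 5 = 4 := by
      norm_num [bBisectAux, bVowels, List.getD, h, show (73:Int) < c by omega,
        show ¬ (85:Int) < c by omega]
    rw [hidx]
    norm_num [bVowels, List.getD]
    rw [abs_of_nonneg (by omega : (0:Int) ≤ c - 65), abs_of_nonneg (by omega : (0:Int) ≤ c - 69),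
        abs_of_nonneg (by omega : (0:Int) ≤ c - 73), abs_of_nonneg (by omega : (0:Int) ≤ c - 79),
        abs_of_nonpos (by omega : c - 85 ≤ (0:Int))]
    simp only [min_def]; split_ifs <;> omega
  rcases lt_or_ge 73 c with h | hb73
  · have hidx : bBisectAux bVowels c 5 0 5 = 3 := by
      norm_num [bBisectAux, bVowels, List.getD, h, show ¬ (79:Int) < c by omega,
        show ¬ (85:Int) < c by omega]
    rw [hidx]
    norm_num [bVowels, List.getD]
    rw [abs_of_nonneg (by omega : (0:Int) ≤ c - 65), abs_of_nonneg (by omega : (0:Int) ≤ c - 69),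
        abs_of_nonneg (by omega : (0:Int) ≤ c - 73), abs_of_nonpos (by omega : c - 79 ≤ (0:Int)),
        abs_of_nonpos (by omega : c - 85 ≤ (0:Int))]
    simp only [min_def]; split_ifs <;> omega
  rcases lt_or_ge 69 c with h | hb69
  · have hidx : bBisectAux bVowels c 5 0 5 = 2 := by
      norm_num [bBisectAux, bVowels, List.getD, h, show ¬ (73:Int) < c by omega]
    rw [hidx]
    norm_num [bVowels, List.getD]
    rw [abs_of_nonneg (by omega : (0:Int) ≤ c - 65), abs_of_nonneg (by omega : (0:Int) ≤ c - 69),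
        abs_of_nonpos (by omega : c - 73 ≤ (0:Int)), abs_of_nonpos (by omega : c - 79 ≤ (0:Int)),
        abs_of_nonpos (by omega : c - 85 ≤ (0:Int))]
    simp only [min_def]; split_ifs <;> omega
  rcases lt_or_ge 65 c with h | hb65
  · have hidx : bBisectAux bVowels c 5 0 5 = 1 := by
      norm_num [bBisectAux, bVowels, List.getD, h, show ¬ (73:Int) < c by omega,
        show ¬ (69:Int) < c by omega]
    rw [hidx]
    norm_num [bVowels, List.getD]
    rw [abs_of_nonneg (by omega : (0:Int) ≤ c - 65), abs_of_nonpos (by omega : c - 69 ≤ (0:Int)),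
        abs_of_nonpos (by omega : c - 73 ≤ (0:Int)), abs_of_nonpos (by omega : c - 79 ≤ (0:Int)),
        abs_of_nonpos (by omega : c - 85 ≤ (0:Int))]
    simp only [min_def]; split_ifs <;> omega
  · have hidx : bBisectAux bVowels c 5 0 5 = 0 := by
      norm_num [bBisectAux, bVowels, List.getD, show ¬ (73:Int) < c by omega,
        show ¬ (69:Int) < c by omega, show ¬ (65:Int) < c by omega]
    rw [hidx]
    norm_num [bVowels, List.getD]
    rw [abs_of_nonpos (by omega : c - 65 ≤ (0:Int)), abs_of_nonpos (by omega : c - 69 ≤ (0:Int)),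
        abs_of_nonpos (by omega : c - 73 ≤ (0:Int)), abs_of_nonpos (by omega : c - 79 ≤ (0:Int)),
        abs_of_nonpos (by omega : c - 85 ≤ (0:Int))]
    simp only [min_def]; split_ifs <;> omega

-- a fold of ++ over a list of strings equals prefix ++ join
theorem pvJoin_foldl (l : List String) (a : String) :
    l.foldl (· ++ ·) a = a ++ String.join l := by
  induction l generalizing a with
  | nil => simp [String.join]
  | cons x xs ih =>
      show xs.foldl (· ++ ·) (a ++ x) = a ++ String.join (x :: xs)
      have hc : String.join (x :: xs) = x ++ String.join xs := by
        show xs.foldl (· ++ ·) ("" ++ x) = x ++ String.join xs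
        rw [ih]; simp
      rw [ih, hc, ← String.append_assoc]

-- A's append-accumulator fold equals the join of the mapped pieces
theorem pvFoldl_eq_join (f : Char → String) (l : List Char) :
    l.foldl (fun s i => s ++ f i) "" = String.join (l.map f) := by
  have key : ∀ a : String, l.foldl (fun s i => s ++ f i) a = a ++ String.join (l.map f) := by
    induction l with
    | nil => intro a; simp [String.join]
    | cons x xs ih =>
        intro a
        show xs.foldl (fun s i => s ++ f i) (a ++ f x) = a ++ String.join ((x :: xs).map f)
        have hc : String.join (f x :: xs.map f) = f x ++ String.join (xs.map f) := by
          show (xs.map f).foldl (· ++ ·) ("" ++ f x) = f x ++ String.join (xs.map f)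
          rw [pvJoin_foldl]; simp
        rw [ih, List.map_cons, hc, ← String.append_assoc]
  simpa using key ""

-- ===== VERDICT (by name: the statement is the Claim_ definition above) =====
theorem distancia_vogal_spec : Claim_equal_distancia_vogal := by
  intro palavra _
  show distancia_vogal palavra = distancia_vogal_alt palavra
  unfold distancia_vogal distancia_vogal_alt
  have hmap : palavra.toList.map
      (fun i =>
        let c : Int := (PySem.Chars.upperChar i).toNat
        let idx := bBisectAux bVowels c 5 0 5
        let d : Int :=
          if idx = 0 then bVowels.getD 0 0 - c
          else if idx = 5 then c - bVowels.getD 4 0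
          else min (c - bVowels.getD (idx - 1) 0) (bVowels.getD idx 0 - c)
        PySem.Int.toStr d)
      = palavra.toList.map pvCharStr := by
    apply List.map_congr_left
    intro i _
    show _ = pvCharStr i
    simp only [pvCharStr]
    exact congrArg PySem.Int.toStr (pvChar_eq ((PySem.Chars.upperChar i).toNat : Int))
  rw [hmap, ← pvFoldl_eq_join pvCharStr]
  rfl
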